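-- pv_equiv track=rewrite | github.com/SilvioBaratto/monopoly | src/monopoly/plots.py | _trim_to_last_nonzero
-- ===== SOURCE A (Python) =====
-- def _trim_to_last_nonzero(history: list[int]) -> tuple[list[int], list[int]]:
--     """Return (turn indices, values) up to and including the last nonzero entry."""
--     if not history:
--         return [], []
--     last_nonzero = len(history) - 1
--     for idx in range(len(history) - 1, -1, -1):
--         if history[idx] != 0:
--             last_nonzero = idx
--             break
--     else:
--         return [], []
--     turns = list(range(last_nonzero + 1))
--     values = history[: last_nonzero + 1]
--     return turns, values
-- ===== SOURCE B (Python) =====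
-- def _trim_to_last_nonzero(history: list[int]) -> tuple[list[int], list[int]]:
--     """Return (turn indices, values) up to and including the last nonzero entry."""
--     values = []
--     pending = 0  # zeros seen since the last flushed nonzero entry
--     for value in history:
--         if value != 0:
--             values.extend([0] * pending)
--             values.append(value)
--             pending = 0
--         else:
--             pending += 1
--     return list(range(len(values))), values
-- ===== Notes on version B (the rewrite author's own statement) =====
-- stated objective: alternative
-- what changed: Instead of locating the last nonzero index and slicing (A's reverse scan with early break), B never computes an index at all: it streams through the list once building the output values directly, buffering a count of zeros and flushing the buffer plus the value whenever a nonzero arrives, so trailing zeros are simply never emitted.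
import Mathlib
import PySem

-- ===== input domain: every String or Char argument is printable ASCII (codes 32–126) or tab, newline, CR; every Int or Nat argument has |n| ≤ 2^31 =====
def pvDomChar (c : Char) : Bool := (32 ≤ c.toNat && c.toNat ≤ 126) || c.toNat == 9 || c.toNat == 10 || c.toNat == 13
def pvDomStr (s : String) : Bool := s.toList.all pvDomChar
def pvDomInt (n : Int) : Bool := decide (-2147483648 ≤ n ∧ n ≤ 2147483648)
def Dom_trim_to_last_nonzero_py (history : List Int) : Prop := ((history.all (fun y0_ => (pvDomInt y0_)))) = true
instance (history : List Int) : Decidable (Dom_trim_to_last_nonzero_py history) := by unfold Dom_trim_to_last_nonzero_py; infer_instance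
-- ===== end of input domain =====

-- B builds the output values directly in one streaming pass with a buffered zero count, instead of A's index search plus slice; same cost, different strategy.

-- ===== PORT A =====
-- the reverse loop 'for idx in range(len(history)-1, -1, -1): if history[idx] != 0: break' ;
-- fuel k+1 means current idx = k; none = the loop's 'else' (no break)
def trimA_find (history : List Int) : Nat → Option Nat
  | 0 => none
  | k+1 => if PySem.List.pyGetD history (k : Int) 0 ≠ 0 then some k else trimA_find history k

def trim_to_last_nonzero_py (history : List Int) : List Int × List Int :=
  if history.isEmpty then ([], [])
  else
    match trimA_find history history.length with
    | none => ([], [])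
    | some last =>
        (PySem.List.pyRange 0 ((last : Int) + 1) 1,
         PySem.List.slice history none (some ((last : Int) + 1)))

-- ===== PORT B =====
-- loop body: flush the buffered zeros and the nonzero value, or count another zero
def trimB_step (st : List Int × Nat) (v : Int) : List Int × Nat :=
  if v ≠ 0 then (st.1 ++ List.replicate st.2 0 ++ [v], 0) else (st.1, st.2 + 1)

def trimB_core (history : List Int) : List Int × Nat :=
  history.foldl trimB_step ([], 0)

def trim_to_last_nonzero_py_alt (history : List Int) : List Int × List Int :=
  let values := (trimB_core history).1
  (PySem.List.pyRange 0 (values.length : Int) 1, values)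

-- ===== PRECONDITION & SPEC =====
def Spec_trim_to_last_nonzero_py (history : List Int) (out : List Int × List Int) : Prop := out = trim_to_last_nonzero_py_alt history
instance (history : List Int) (out : List Int × List Int) : Decidable (Spec_trim_to_last_nonzero_py history out) := by unfold Spec_trim_to_last_nonzero_py; infer_instance

-- ===== CLAIM (what is proved, stated in full; the proofs are below) =====
def Claim_equal_trim_to_last_nonzero_py : Prop := ∀ (history : List Int), Dom_trim_to_last_nonzero_py history → Spec_trim_to_last_nonzero_py history (trim_to_last_nonzero_py history)

-- ===== LEMMAS AND PROOFS =====

lemma trimA_find_lt (h : List Int) : ∀ m k, trimA_find h m = some k → k < m := by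
  intro m
  induction m with
  | zero => intro k hk; simp [trimA_find] at hk
  | succ n ih =>
      intro k hk
      simp only [trimA_find] at hk
      split at hk
      · injection hk with hnk; omega
      · exact Nat.lt_succ_of_lt (ih k hk)

-- appending past the scanned prefix does not change the reverse scan
lemma trimA_find_append (h : List Int) (x : Int) :
    ∀ m, m ≤ h.length → trimA_find (h ++ [x]) m = trimA_find h m := by
  intro m
  induction m with
  | zero => intro _; rfl
  | succ k ih =>
      intro hk
      have hkl : k < h.length := by omega
      have hget : PySem.List.pyGetD (h ++ [x]) (k : Int) 0 = PySem.List.pyGetD h (k : Int) 0 := by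
        simp [PySem.List.pyGetD_natCast, List.getD, List.getElem?_append_left hkl]
      simp only [trimA_find, hget, ih (by omega)]

lemma trimB_core_snoc (h : List Int) (x : Int) :
    trimB_core (h ++ [x]) = trimB_step (trimB_core h) x := by
  unfold trimB_core
  rw [List.foldl_append]
  rfl

-- the flushed values plus the buffered zeros reconstitute the input
lemma trimB_inv (h : List Int) :
    (trimB_core h).1 ++ List.replicate (trimB_core h).2 0 = h := by
  induction h using List.reverseRecOn with
  | nil => rfl
  | append_singleton t x ih =>
      rw [trimB_core_snoc]
      unfold trimB_step
      by_cases hx : x = 0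
      · subst hx
        simp only [ne_eq, not_true_eq_false, if_false]
        rw [List.replicate_succ' (n := (trimB_core t).2)]
        rw [← List.append_assoc, ih]
      · simp only [ne_eq, hx, not_false_eq_true, if_true]
        simpa using congrArg (fun l => l ++ [x]) ih

-- B's streamed values are exactly A's prefix up to the last nonzero
lemma trimB_eq_take (h : List Int) :
    (trimB_core h).1 =
      (match trimA_find h h.length with | none => [] | some k => h.take (k+1)) := by
  induction h using List.reverseRecOn with
  | nil => rfl
  | append_singleton t x ih =>
      rw [trimB_core_snoc]
      unfold trimB_step
      have hlen : (t ++ [x]).length = t.length + 1 := by simp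
      rw [hlen]
      by_cases hx : x = 0
      · subst hx
        have hget : PySem.List.pyGetD (t ++ [(0 : Int)]) (t.length : Int) 0 = 0 := by
          simp [PySem.List.pyGetD_natCast, List.getD]
        simp only [trimA_find, hget, ne_eq, not_true_eq_false, if_false]
        rw [trimA_find_append t 0 t.length le_rfl]
        cases hf : trimA_find t t.length with
        | none => simpa [hf] using ih
        | some k =>
            have hk := trimA_find_lt t t.length k hf
            rw [hf] at ih
            simp only []
            rw [ih, List.take_append_of_le_length (by omega)]
      · have hget : PySem.List.pyGetD (t ++ [x]) (t.length : Int) 0 ≠ 0 := by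
          simpa [PySem.List.pyGetD_natCast, List.getD] using hx
        simp only [trimA_find, hget, ne_eq, hx, not_false_eq_true, if_true]
        rw [trimB_inv t]
        simp

-- ===== VERDICT (by name: the statement is the Claim_ definition above) =====
theorem trim_to_last_nonzero_py_spec : Claim_equal_trim_to_last_nonzero_py := by
  intro history _
  unfold Spec_trim_to_last_nonzero_py trim_to_last_nonzero_py trim_to_last_nonzero_py_alt
  have hmain := trimB_eq_take history
  by_cases hnil : history.isEmpty
  · have : history = [] := List.isEmpty_iff.mp hnil
    subst this
    simp [trimB_core, PySem.List.pyRange]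
  · cases hfind : trimA_find history history.length with
    | none =>
        rw [hfind] at hmain
        simp only at hmain
        simp [hnil, hmain, PySem.List.pyRange]
    | some k =>
        rw [hfind] at hmain
        simp only at hmain
        have hk := trimA_find_lt history history.length k hfind
        have hlen : ((trimB_core history).1.length : Int) = (k : Int) + 1 := by
          rw [hmain, List.length_take]; push_cast; omega
        have hslice : PySem.List.slice history none (some ((k : Int) + 1)) = history.take (k+1) := by
          have : ((k : Int) + 1) = ((k + 1 : Nat) : Int) := by push_cast; ring
          rw [this, PySem.List.slice_to_natCast]
        rw [if_neg hnil]
        simp only [hfind]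
        rw [hslice, hlen, hmain]
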